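-- pv_equiv track=rewrite | github.com/NamPhuThuy/CP-Notebook | LapTrinhOnline/(2024-11-04) Kiem tra giua ki/Di_choi_hoi.py | solve
-- ===== SOURCE A (Python) =====
-- def solve(N, A):
--     B = [1 if x > 0 else -1 for x in A]
--
--     pref = [0] * (N + 1)
--     for i in range(N):
--         pref[i + 1] = pref[i] + B[i]
--
--     cnt = {0: 1}
--     res = 0
--
--     for i in range(1, N + 1):
--         res += cnt.get(pref[i], 0)
--         cnt[pref[i]] = cnt.get(pref[i], 0) + 1
--
--     return res
-- ===== SOURCE B (Python) =====
-- def solve(N, A):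
--     # prefix sums of the +/-1 signs, seeded with 0
--     sums = [0]
--     s = 0
--     for x in A[:max(N, 0)]:
--         s += 1 if x > 0 else -1
--         sums.append(s)
--     # equal prefix sums become adjacent after sorting; each run of length m
--     # contributes m*(m-1)//2 balanced subarrays
--     sums.sort()
--     res = 0
--     run = 0
--     prev = None
--     for v in sums:
--         if v == prev:
--             run += 1
--         else:
--             res += run * (run - 1) // 2
--             run = 1
--             prev = v
--     return res + run * (run - 1) // 2
-- ===== Notes on version B (the rewrite author's own statement) =====
-- stated objective: alternative
-- what changed: Replaces A's online hashmap pair-counting over a prebuilt prefix array with a sort-based method: build the list of prefix sums of the signs once, sort it, and sum m*(m-1)//2 over each run of equal values (no counting dict at all).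
import Mathlib
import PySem

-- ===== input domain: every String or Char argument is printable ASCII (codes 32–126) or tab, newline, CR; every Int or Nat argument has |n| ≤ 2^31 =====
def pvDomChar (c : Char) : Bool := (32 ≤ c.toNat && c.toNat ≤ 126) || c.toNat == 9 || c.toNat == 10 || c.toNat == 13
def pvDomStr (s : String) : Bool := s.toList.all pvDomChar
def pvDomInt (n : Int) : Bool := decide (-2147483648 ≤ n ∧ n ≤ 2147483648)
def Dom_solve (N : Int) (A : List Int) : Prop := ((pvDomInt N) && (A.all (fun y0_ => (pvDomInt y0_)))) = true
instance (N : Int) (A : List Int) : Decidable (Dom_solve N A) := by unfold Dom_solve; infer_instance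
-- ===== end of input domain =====

-- B replaces A's dict-based online pair counting over a prebuilt prefix array by a sort:
-- it collects the prefix sums of the signs, sorts them, and adds run*(run-1)//2 per run of
-- equal values; equal to A wherever A returns (N ≤ len A).

-- ===== PORT A =====
def solve (N : Int) (A : List Int) : Int :=
  let B := A.map (fun x => if x > 0 then (1 : Int) else -1)
  let pref0 : List Int := List.replicate (N + 1).toNat 0
  let pref := (PySem.List.pyRange 0 N 1).foldl
    (fun pref i =>
      PySem.List.pySetD pref (i + 1)
        (PySem.List.pyGetD pref i 0 + PySem.List.pyGetD B i 0)) pref0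
  let st := (PySem.List.pyRange 1 (N + 1) 1).foldl
    (fun (st : PySem.Dict Int Int × Int) i =>
      let p := PySem.List.pyGetD pref i 0
      let res := st.2 + st.1.getD p 0
      (st.1.insert p (st.1.getD p 0 + 1), res))
    (PySem.Dict.ofList [((0 : Int), (1 : Int))], 0)
  st.2

-- ===== PORT B =====
-- run*(run-1)//2, B's closed form for the pairs inside one run
def c2 (r : Int) : Int := PySem.Int.floordiv (r * (r - 1)) 2

-- the body of B's run-length loop; state = (res, run, prev)
def bstep (st : Int × Int × Option Int) (v : Int) : Int × Int × Option Int :=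
  if some v == st.2.2 then (st.1, st.2.1 + 1, st.2.2)
  else (st.1 + c2 st.2.1, 1, some v)

def solve_alt (N : Int) (A : List Int) : Int :=
  let built := (PySem.List.slice A (some 0) (some (max N 0))).foldl
    (fun (st : List Int × Int) x =>
      let s := st.2 + (if x > 0 then (1 : Int) else -1)
      (st.1 ++ [s], s)) ([0], 0)
  let sums := PySem.List.sorted built.1 (fun v => v) false
  let st := sums.foldl bstep (0, 0, none)
  st.1 + c2 st.2.1

-- ===== PRECONDITION & SPEC =====
-- A raises IndexError (reading B[i] past the end of B) exactly when N > len(A); excluded.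
def Pre_solve (N : Int) (A : List Int) : Prop := N ≤ A.length
instance (N : Int) (A : List Int) : Decidable (Pre_solve N A) := by unfold Pre_solve; infer_instance
def pvWitness_solve : Int × List Int := (3, [1, -2, 3])

def Spec_solve (N : Int) (A : List Int) (out : Int) : Prop := out = solve_alt N A
instance (N : Int) (A : List Int) (out : Int) : Decidable (Spec_solve N A out) := by unfold Spec_solve; infer_instance

-- ===== CLAIM (what is proved, stated in full; the proofs are below) =====
def Claim_equal_solve : Prop := ∀ (N : Int) (A : List Int), Dom_solve N A → Pre_solve N A → Spec_solve N A (solve N A)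

-- ===== LEMMAS AND PROOFS =====

-- the sign A maps each element to
def sgn (x : Int) : Int := if x > 0 then 1 else -1

-- A's counting-loop body, as a function of the looked-up key
def astep (st : PySem.Dict Int Int × Int) (p : Int) : PySem.Dict Int Int × Int :=
  (st.1.insert p (st.1.getD p 0 + 1), st.2 + st.1.getD p 0)

-- the sequence of prefix sums of the signs
def scanKeys (s : Int) : List Int → List Int
  | [] => []
  | x :: t => (s + sgn x) :: scanKeys (s + sgn x) t

-- number of pairs (i < j) of equal values in seen ++ l with both in l or one in seen
def pairsFrom (seen : List Int) : List Int → Int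
  | [] => 0
  | k :: t => (seen.count k : Int) + pairsFrom (seen ++ [k]) t

-- A's counting fold computes pairsFrom when the dict is the counter of `seen`
lemma afold_pairs (l : List Int) : ∀ (d : PySem.Dict Int Int) (res : Int) (seen : List Int),
    (∀ k, d.getD k 0 = (seen.count k : Int)) →
    (l.foldl astep (d, res)).2 = res + pairsFrom seen l := by
  induction l with
  | nil => intro d res seen _; simp [pairsFrom]
  | cons k t ih =>
    intro d res seen hd
    simp only [List.foldl_cons, astep, pairsFrom]
    rw [ih _ _ (seen ++ [k]) ?_, hd k]
    · ring
    · intro k'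
      rw [PySem.Dict.getD_insert]
      by_cases hk : k' = k
      · subst hk; rw [if_pos rfl, hd k']; simp
      · rw [if_neg hk, hd k']
        simp [List.count_append, Ne.symm hk]

-- pairsFrom only depends on seen through the counts of elements that occur in l
lemma pairsFrom_congr (l : List Int) : ∀ (s₁ s₂ : List Int),
    (∀ k ∈ l, s₁.count k = s₂.count k) → pairsFrom s₁ l = pairsFrom s₂ l := by
  induction l with
  | nil => intro _ _ _; rfl
  | cons k t ih =>
    intro s₁ s₂ h
    simp only [pairsFrom, h k (List.mem_cons_self)]
    congr 1
    apply ih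
    intro k' hk'
    simp [List.count_append, h k' (List.mem_cons_of_mem _ hk')]

-- pairsFrom is invariant under permutation of the tail
lemma pairsFrom_perm {l l' : List Int} (h : l.Perm l') :
    ∀ seen : List Int, pairsFrom seen l = pairsFrom seen l' := by
  induction h with
  | nil => intro _; rfl
  | cons x _ ih => intro seen; simp only [pairsFrom, ih]
  | swap a b l =>
    intro seen
    simp only [pairsFrom]
    rw [pairsFrom_congr l (seen ++ [b] ++ [a]) (seen ++ [a] ++ [b])
      (by intro k _; simp only [List.count_append]; omega)]
    have : ((seen ++ [b]).count a : Int) + (seen.count b : Int)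
        = ((seen ++ [a]).count b : Int) + (seen.count a : Int) := by
      by_cases hab : a = b
      · subst hab; ring
      · simp [List.count_append, hab, Ne.symm hab]
        omega
    push_cast at this ⊢
    linarith
  | trans _ _ ih₁ ih₂ => intro seen; rw [ih₁, ih₂]

lemma c2_succ (r : Int) : c2 r + r = c2 (r + 1) := by
  unfold c2
  rw [PySem.Int.floordiv_eq_ediv_of_pos (by norm_num), PySem.Int.floordiv_eq_ediv_of_pos (by norm_num)]
  have h : (r + 1) * (r + 1 - 1) = r * (r - 1) + r * 2 := by ring
  rw [h, Int.add_mul_ediv_right _ _ (by norm_num : (2:Int) ≠ 0)]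

lemma c2_one : c2 1 = 0 := by decide
lemma c2_zero : c2 0 = 0 := by decide

-- B's run-length loop over a sorted tail counts pairsFrom against replicate run p
lemma scan_eq (t : List Int) : ∀ (p run res : Int), 0 ≤ run →
    List.Pairwise (· ≤ ·) (p :: t) →
    (t.foldl bstep (res, run, some p)).1 + c2 ((t.foldl bstep (res, run, some p)).2.1)
      = res + c2 run + pairsFrom (List.replicate run.toNat p) t := by
  induction t with
  | nil => intro p run res _ _; simp [pairsFrom]
  | cons x t ih =>
    intro p run res hrun hp
    rcases List.pairwise_cons.mp hp with ⟨h1, h2⟩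
    have hpx : p ≤ x := h1 x List.mem_cons_self
    simp only [List.foldl_cons, bstep]
    by_cases hxp : x = p
    · subst hxp
      rw [if_pos (by simp)]
      have hpair : List.Pairwise (· ≤ ·) (x :: t) := h2
      rw [ih x (run + 1) res (by omega) hpair]
      simp only [pairsFrom]
      have hrep : List.replicate run.toNat x ++ [x] = List.replicate (run + 1).toNat x := by
        rw [← List.replicate_succ']
        congr 1
        omega
      rw [hrep]
      simp only [List.count_replicate, beq_self_eq_true, if_pos]
      have hcast : ((run.toNat : Int)) = run := by omega
      have hc := c2_succ run
      push_cast [hcast]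
      linarith
    · rw [if_neg (by simp [hxp])]
      rw [ih x 1 (res + c2 run) (by omega) h2]
      simp only [pairsFrom]
      have hcount : (List.replicate run.toNat p).count x = 0 := by
        simp [List.count_replicate, Ne.symm hxp]
      rw [hcount]
      have hcongr : pairsFrom (List.replicate run.toNat p ++ [x]) t
          = pairsFrom (List.replicate (1 : Int).toNat x) t := by
        apply pairsFrom_congr
        intro k hk
        have hxk : x ≤ k := (List.pairwise_cons.mp h2).1 k hk
        have hkp : k ≠ p := by
          have : p < x := lt_of_le_of_ne hpx (Ne.symm hxp)
          omega
        simp [List.count_append, List.count_replicate, Ne.symm hkp]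
      rw [hcongr, c2_one]
      push_cast
      ring

-- B's building loop produces acc ++ the prefix-sum scan
lemma built_eq (xs : List Int) : ∀ (acc : List Int) (s : Int),
    (xs.foldl (fun (st : List Int × Int) x =>
      (st.1 ++ [st.2 + (if x > 0 then (1 : Int) else -1)], st.2 + (if x > 0 then (1 : Int) else -1)))
      (acc, s)).1 = acc ++ scanKeys s xs := by
  induction xs with
  | nil => intro acc s; simp [scanKeys]
  | cons x t ih =>
    intro acc s
    simp only [List.foldl_cons, scanKeys]
    rw [ih]
    simp [sgn]

-- B on a (nonempty) list of sums equals pairsFrom [] of it, after sorting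
lemma runcount_eq_pairs (P : List Int) (q : Int) (ts : List Int)
    (hsort : PySem.List.sorted P (fun v => v) false = q :: ts) :
    ((q :: ts).foldl bstep (0, 0, none)).1 + c2 (((q :: ts).foldl bstep (0, 0, none)).2.1)
      = pairsFrom [] P := by
  have hperm : (q :: ts).Perm P := hsort ▸ PySem.List.sorted_perm P (fun v => v) false
  have hpw : List.Pairwise (· ≤ ·) (q :: ts) := by
    have := PySem.List.sorted_pairwise (xs := P) (key := fun v => v)
    rw [hsort] at this
    exact this
  rw [List.foldl_cons]
  have hfirst : bstep (0, 0, none) q = (0, 1, some q) := by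
    simp [bstep, c2_zero]
  rw [hfirst, scan_eq ts q 1 0 (by omega) hpw, c2_one]
  have h1t : List.replicate (1 : Int).toNat q = [q] := rfl
  rw [h1t]
  have : pairsFrom [] (q :: ts) = pairsFrom [q] ts := by
    simp [pairsFrom]
  rw [← this, pairsFrom_perm hperm]
  ring

-- the closed form of scanKeys
lemma scanKeys_closed (l : List Int) : ∀ s : Int,
    scanKeys s l = (List.range l.length).map (fun k => s + ((l.map sgn).take (k + 1)).sum) := by
  induction l with
  | nil => intro s; rfl
  | cons x t ih =>
    intro s
    simp only [scanKeys, List.length_cons, List.range_succ_eq_map, List.map_cons, List.map_map,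
      ih (s + sgn x)]
    congr 1
    · simp
    · apply List.map_congr_left
      intro k _
      simp [Function.comp, List.take_succ_cons]
      ring

-- a set at the junction of an append
lemma set_append_len {α : Type} (as bs : List α) (b v : α) :
    (as ++ b :: bs).set as.length v = as ++ v :: bs := by
  induction as with
  | nil => rfl
  | cons a t ih => simp [ih]

-- filling A's pref array: the loop computes the prefix sums of lB
lemma fill (lB : List Int) (n : Nat) (hn : n ≤ lB.length) : ∀ (d j : Nat), j + d = n →
    (PySem.List.pyRange (j : Int) (n : Int) 1).foldl
      (fun pref i => PySem.List.pySetD pref (i + 1)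
        (PySem.List.pyGetD pref i 0 + PySem.List.pyGetD lB i 0))
      ((List.range (j + 1)).map (fun k => (lB.take k).sum) ++ List.replicate (n - j) 0)
    = (List.range (n + 1)).map (fun k => (lB.take k).sum) := by
  intro d
  induction d with
  | zero =>
    intro j hj
    have hj' : j = n := by omega
    subst hj'
    simp [PySem.List.pyRange_one_eq_nil (le_refl ((j : Nat) : Int))]
  | succ d ih =>
    intro j hj
    have hjn : (j : Int) < (n : Int) := by exact_mod_cast (by omega : j < n)
    rw [PySem.List.pyRange_one_cons hjn, List.foldl_cons]
    have hget : PySem.List.pyGetD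
        ((List.range (j + 1)).map (fun k => (lB.take k).sum) ++ List.replicate (n - j) 0)
        (j : Int) 0 = (lB.take j).sum := by
      rw [PySem.List.pyGetD_natCast]
      rw [List.getD_eq_getElem?_getD, List.getElem?_append_left (by simp)]
      simp
    have hgetB : PySem.List.pyGetD lB (j : Int) 0 = lB[j]'(by omega) := by
      rw [PySem.List.pyGetD_natCast, List.getD_eq_getElem?_getD, List.getElem?_eq_getElem (by omega)]
      rfl
    rw [hget, hgetB]
    have hcast : (j : Int) + 1 = ((j + 1 : Nat) : Int) := by push_cast; ring
    rw [hcast, PySem.List.pySetD_natCast]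
    have hrep : List.replicate (n - j) (0 : Int) = 0 :: List.replicate (n - (j + 1)) 0 := by
      have : n - j = (n - (j + 1)) + 1 := by omega
      rw [this, List.replicate_succ]
    rw [hrep]
    have hlen : ((List.range (j + 1)).map (fun k => (lB.take k).sum)).length = j + 1 := by simp
    have hset : ((List.range (j + 1)).map (fun k => (lB.take k).sum) ++
        0 :: List.replicate (n - (j + 1)) 0).set (j + 1) ((lB.take j).sum + lB[j]'(by omega))
        = (List.range (j + 1)).map (fun k => (lB.take k).sum) ++
          ((lB.take j).sum + lB[j]'(by omega)) :: List.replicate (n - (j + 1)) 0 := by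
      have h := set_append_len ((List.range (j + 1)).map (fun k => (lB.take k).sum))
        (List.replicate (n - (j + 1)) 0) 0 ((lB.take j).sum + lB[j]'(by omega))
      rwa [hlen] at h
    rw [hset]
    have hsum : (lB.take j).sum + lB[j]'(by omega) = (lB.take (j + 1)).sum := by
      rw [List.take_add_one, List.sum_append]
      simp [List.getElem?_eq_getElem (show j < lB.length by omega)]
    have hstep : (List.range (j + 1)).map (fun k => (lB.take k).sum) ++
        ((lB.take j).sum + lB[j]'(by omega)) :: List.replicate (n - (j + 1)) 0
        = (List.range (j + 1 + 1)).map (fun k => (lB.take k).sum) ++ List.replicate (n - (j + 1)) 0 := by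
      rw [List.range_succ (n := j + 1), List.map_append, List.append_assoc]
      simp [hsum]
    rw [hstep]
    exact ih (j + 1) (by omega)

-- the keys A's counting loop reads off pref are exactly the prefix sums of the signs
lemma keys_eq (lB : List Int) (n : Nat) (_hn : n ≤ lB.length) :
    (PySem.List.pyRange 1 ((n : Int) + 1) 1).map
      (fun i => PySem.List.pyGetD ((List.range (n + 1)).map (fun k => (lB.take k).sum)) i 0)
    = (List.range n).map (fun k => ((lB.take n).take (k + 1)).sum) := by
  rw [PySem.List.pyRange_one]
  have h1 : ((n : Int) + 1 - 1).toNat = n := by omega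
  rw [h1, List.map_map]
  apply List.map_congr_left
  intro k hk
  rw [List.mem_range] at hk
  simp only [Function.comp]
  have hcast : (1 : Int) + (k : Int) = ((k + 1 : Nat) : Int) := by push_cast; ring
  rw [hcast, PySem.List.pyGetD_natCast, List.getD_eq_getElem?_getD,
    List.getElem?_map, List.getElem?_range (by omega)]
  simp [List.take_take, Nat.min_eq_left (by omega : k + 1 ≤ n)]

-- the seed dict of A is the counter of [0]
lemma seed_counter (k : Int) :
    (PySem.Dict.ofList [((0 : Int), (1 : Int))]).getD k 0 = (([(0 : Int)].count k : Int)) := by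
  by_cases h : k = 0
  · subst h; decide
  · have h0 : PySem.Dict.ofList [((0 : Int), (1 : Int))] = PySem.Dict.empty.insert 0 1 := rfl
    rw [h0, PySem.Dict.getD_insert, if_neg h, PySem.Dict.getD_empty]
    simp [Ne.symm h]

-- ===== VERDICT (by name: the statement is the Claim_ definition above) =====
theorem solve_spec : Claim_equal_solve := by
  intro N A _ hpre
  unfold Spec_solve solve solve_alt
  dsimp only
  by_cases h0 : N ≤ 0
  · rw [PySem.List.pyRange_one_eq_nil (by omega : N + 1 ≤ 1),
      max_eq_right h0, PySem.List.slice_zero_start, PySem.List.slice_to A (le_refl (0 : Int))]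
    simp only [Int.toNat_zero, List.take_zero, List.foldl_nil]
    decide
  · have hN : N = ((N.toNat : Nat) : Int) := by omega
    set n := N.toNat with hn
    have hnA : n ≤ A.length := by
      unfold Pre_solve at hpre; omega
    rw [hN, max_eq_left (by omega)]
    rw [PySem.List.slice_zero_start, PySem.List.slice_to A (by omega : (0:Int) ≤ (n:Int))]
    have htoNat : ((n : Int)).toNat = n := by omega
    rw [htoNat]
    set lB := A.map sgn with hlB
    have hlBlen : n ≤ lB.length := by simp [hlB, hnA]
    have hmap : A.map (fun x => if x > 0 then (1 : Int) else -1) = lB := rfl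
    rw [hmap]
    -- A's pref array is the list of prefix sums
    have hrep : List.replicate ((n : Int) + 1).toNat (0 : Int)
        = (List.range (0 + 1)).map (fun k => (lB.take k).sum) ++ List.replicate n 0 := by
      have : ((n : Int) + 1).toNat = n + 1 := by omega
      rw [this]
      simp [List.replicate_succ]
    have hfill := fill lB n hlBlen n 0 (by omega)
    simp only [Nat.cast_zero, Nat.sub_zero] at hfill
    rw [← hrep] at hfill
    rw [hfill]
    -- A's counting loop is the astep fold over the key list
    have hA : (PySem.List.pyRange 1 ((n : Int) + 1) 1).foldl
        (fun (st : PySem.Dict Int Int × Int) i =>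
          astep st (PySem.List.pyGetD ((List.range (n + 1)).map (fun k => (lB.take k).sum)) i 0))
        (PySem.Dict.ofList [((0 : Int), (1 : Int))], 0)
        = (((PySem.List.pyRange 1 ((n : Int) + 1) 1).map
            (fun i => PySem.List.pyGetD ((List.range (n + 1)).map (fun k => (lB.take k).sum)) i 0)).foldl
            astep (PySem.Dict.ofList [((0 : Int), (1 : Int))], 0)) := by
      rw [List.foldl_map]
    have hkeysScan : (List.range n).map (fun k => ((lB.take n).take (k + 1)).sum)
        = scanKeys 0 (A.take n) := by
      rw [scanKeys_closed]
      have hxs : ((A.take n).map sgn) = lB.take n := by simp [hlB, List.map_take]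
      have hlenxs : (A.take n).length = n := by simp [hnA]
      rw [hxs, hlenxs]
      simp
    -- left side: pairsFrom [] (0 :: scanKeys 0 (A.take n))
    have hleft : ((PySem.List.pyRange 1 ((n : Int) + 1) 1).foldl
        (fun (st : PySem.Dict Int Int × Int) i =>
          astep st (PySem.List.pyGetD ((List.range (n + 1)).map (fun k => (lB.take k).sum)) i 0))
        (PySem.Dict.ofList [((0 : Int), (1 : Int))], 0)).2
        = pairsFrom [] (0 :: scanKeys 0 (A.take n)) := by
      rw [hA, keys_eq lB n hlBlen, hkeysScan,
        afold_pairs _ _ _ [(0 : Int)] seed_counter]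
      simp [pairsFrom]
    -- right side: B's sums list is 0 :: scanKeys 0 (A.take n)
    have hbuilt : ((A.take n).foldl (fun (st : List Int × Int) x =>
        (st.1 ++ [st.2 + (if x > 0 then (1 : Int) else -1)], st.2 + (if x > 0 then (1 : Int) else -1)))
        ([0], 0)).1 = (0 : Int) :: scanKeys 0 (A.take n) := by
      rw [built_eq]
      rfl
    set P : List Int := (0 : Int) :: scanKeys 0 (A.take n) with hP
    have hsortedNe : PySem.List.sorted P (fun v => v) false ≠ [] := by
      intro hc
      rw [PySem.List.sorted_eq_nil_iff] at hc
      simp [hP] at hc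
    obtain ⟨q, ts, hsort⟩ : ∃ q ts, PySem.List.sorted P (fun v => v) false = q :: ts := by
      cases hcase : PySem.List.sorted P (fun v => v) false with
      | nil => exact absurd hcase hsortedNe
      | cons q ts => exact ⟨q, ts, rfl⟩
    show ((PySem.List.pyRange 1 ((n : Int) + 1) 1).foldl
        (fun (st : PySem.Dict Int Int × Int) i =>
          astep st (PySem.List.pyGetD ((List.range (n + 1)).map (fun k => (lB.take k).sum)) i 0))
        (PySem.Dict.ofList [((0 : Int), (1 : Int))], 0)).2
      = _
    rw [hleft]
    rw [show ((A.take n).foldl (fun (st : List Int × Int) x =>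
        (st.1 ++ [st.2 + (if x > 0 then (1 : Int) else -1)], st.2 + (if x > 0 then (1 : Int) else -1)))
        ([0], 0)).1 = P from hbuilt]
    rw [hsort]
    exact (runcount_eq_pairs P q ts hsort).symm
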